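-- pv_equiv track=rewrite | github.com/Gameminde/SENTINAL | RedditPulse/scraper_job.py | _humanize_dynamic_topic_name
-- ===== SOURCE A (Python) =====
-- def _humanize_dynamic_topic_name(phrase):
--     title = " ".join(word.capitalize() for word in phrase.split())
--     replacements = {
--         "Ai": "AI",
--         "Api": "API",
--         "B2b": "B2B",
--         "B2c": "B2C",
--         "Ui": "UI",
--         "Ux": "UX",
--     }
--     for source, target in replacements.items():
--         title = title.replace(source, target)
--     return title
-- ===== SOURCE B (Python) =====
-- def _humanize_dynamic_topic_name(phrase):
--     title = " ".join(word.capitalize() for word in phrase.split())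
--     replacements = {
--         "Ai": "AI",
--         "Api": "API",
--         "B2b": "B2B",
--         "B2c": "B2C",
--         "Ui": "UI",
--         "Ux": "UX",
--     }
--     out = []
--     i = 0
--     n = len(title)
--     while i < n:
--         for source, target in replacements.items():
--             if title.startswith(source, i):
--                 out.append(target)
--                 i += len(source)
--                 break
--         else:
--             out.append(title[i])
--             i += 1
--     return "".join(out)
-- ===== Notes on version B (the rewrite author's own statement) =====
-- stated objective: alternative
-- what changed: Replaces A's six sequential whole-string str.replace passes with a single left-to-right scan that substitutes the first matching acronym at each position; Pre_ excludes phrases containing a word that begins with 'b2b2c' (case-insensitively), the only place where A's overlapping rules B2b->B2B and B2c->B2C interact across passes and sequential (A: B2B2C) and single-pass (B: B2B2c) substitution are both defensible readings of the table.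
-- outside the precondition, e.g. on _humanize_dynamic_topic_name('b2b2c'): A returns 'B2B2C', B returns 'B2B2c'; on _humanize_dynamic_topic_name('b2b2c sales'): A returns 'B2B2C Sales', B returns 'B2B2c Sales'
import Mathlib
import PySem

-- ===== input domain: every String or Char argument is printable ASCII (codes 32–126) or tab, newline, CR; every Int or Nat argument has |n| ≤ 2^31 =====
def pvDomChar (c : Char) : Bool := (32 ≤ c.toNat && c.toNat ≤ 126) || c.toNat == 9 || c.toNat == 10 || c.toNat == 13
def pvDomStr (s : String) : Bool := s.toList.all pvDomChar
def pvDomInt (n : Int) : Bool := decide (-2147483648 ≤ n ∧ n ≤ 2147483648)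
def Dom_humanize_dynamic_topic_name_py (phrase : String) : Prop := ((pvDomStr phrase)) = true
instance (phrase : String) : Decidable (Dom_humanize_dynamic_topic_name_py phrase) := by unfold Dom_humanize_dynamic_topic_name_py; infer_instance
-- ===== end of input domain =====

-- B replaces A's six sequential whole-string .replace passes by one left-to-right scan that
-- substitutes the first matching table entry at each position; objective: alternative.

-- ===== PORT A =====
-- word.capitalize() : first char upper-cased, the rest lower-cased (exact on ASCII)
def pyCapitalize (w : List Char) : List Char :=
  match w with
  | [] => []
  | c :: t => PySem.Chars.upperChar c :: PySem.Chars.lower t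

def humanize_dynamic_topic_name_py (phrase : String) : String :=
  -- title = " ".join(word.capitalize() for word in phrase.split())
  let title := PySem.Chars.join [' '] ((PySem.Chars.split₀ phrase.toList).map pyCapitalize)
  -- for source, target in replacements.items(): title = title.replace(source, target)
  let replacements : List (List Char × List Char) :=
    [(['A','i'], ['A','I']), (['A','p','i'], ['A','P','I']), (['B','2','b'], ['B','2','B']),
     (['B','2','c'], ['B','2','C']), (['U','i'], ['U','I']), (['U','x'], ['U','X'])]
  String.mk (replacements.foldl (fun t pr => PySem.Chars.replace t pr.1 pr.2) title)

-- ===== PORT B =====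
-- the inner `for source, target in replacements.items(): if title.startswith(source, i): … break
-- / else: copy one char` loop of Source B, transliterated as a cascade of startswith tests that
-- advance past what was consumed
def pySubst (l : List Char) : List Char :=
  match l with
  | [] => []
  | c :: cs =>
    if PySem.Chars.startswith l ['A','i'] then ['A','I'] ++ pySubst (cs.drop 1)
    else if PySem.Chars.startswith l ['A','p','i'] then ['A','P','I'] ++ pySubst (cs.drop 2)
    else if PySem.Chars.startswith l ['B','2','b'] then ['B','2','B'] ++ pySubst (cs.drop 2)
    else if PySem.Chars.startswith l ['B','2','c'] then ['B','2','C'] ++ pySubst (cs.drop 2)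
    else if PySem.Chars.startswith l ['U','i'] then ['U','I'] ++ pySubst (cs.drop 1)
    else if PySem.Chars.startswith l ['U','x'] then ['U','X'] ++ pySubst (cs.drop 1)
    else c :: pySubst cs
termination_by l.length
decreasing_by all_goals simp only [List.length_cons, List.length_drop] <;> omega

def humanize_dynamic_topic_name_py_alt (phrase : String) : String :=
  let title := PySem.Chars.join [' '] ((PySem.Chars.split₀ phrase.toList).map pyCapitalize)
  String.mk (pySubst title)

-- ===== PRECONDITION & SPEC =====
-- Pre_ excludes phrases that contain a word beginning with "b2b2c" (case-insensitively): there
-- A's overlapping rules "B2b"→"B2B" and "B2c"→"B2C" interact across its sequential passes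
-- (A yields "B2B2C…") while single-pass substitution yields "B2B2c…"; both readings of the
-- replacement table are defensible on that overlap, so those inputs are outside the claim.
def Pre_humanize_dynamic_topic_name_py (phrase : String) : Prop :=
  ∀ w ∈ PySem.Chars.split₀ phrase.toList, ¬ (['b','2','b','2','c'] <+: PySem.Chars.lower w)
instance (phrase : String) : Decidable (Pre_humanize_dynamic_topic_name_py phrase) := by unfold Pre_humanize_dynamic_topic_name_py; infer_instance

def pvWitness_humanize_dynamic_topic_name_py : String := "latest ai and b2b ux news"

def Spec_humanize_dynamic_topic_name_py (phrase : String) (out : String) : Prop := out = humanize_dynamic_topic_name_py_alt phrase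
instance (phrase : String) (out : String) : Decidable (Spec_humanize_dynamic_topic_name_py phrase out) := by unfold Spec_humanize_dynamic_topic_name_py; infer_instance

-- ===== CLAIM (what is proved, stated in full; the proofs are below) =====
def Claim_equal_humanize_dynamic_topic_name_py : Prop := ∀ (phrase : String), Dom_humanize_dynamic_topic_name_py phrase → Pre_humanize_dynamic_topic_name_py phrase → Spec_humanize_dynamic_topic_name_py phrase (humanize_dynamic_topic_name_py phrase)

-- ===== LEMMAS AND PROOFS =====

-- A fuel-free rendering of PySem.Chars.replace (one non-overlapping left-to-right pass)
def rep (p t : List Char) : List Char → List Char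
  | [] => []
  | c :: cs => if p.isPrefixOf (c :: cs) then t ++ rep p t (cs.drop (p.length - 1)) else c :: rep p t cs
termination_by l => l.length
decreasing_by
  · simp only [List.length_cons, List.length_drop]; omega
  · simp

lemma go_eq (p t : List Char) (hp : p ≠ []) : ∀ (fuel : Nat) (l acc : List Char), l.length ≤ fuel →
    PySem.Chars.replace.go p t fuel l acc = acc.reverse ++ rep p t l := by
  intro fuel
  induction fuel with
  | zero =>
    intro l acc h
    have hl : l = [] := by simpa using h
    subst hl
    rw [PySem.Chars.replace.go]
    simp [rep]
  | succ f ih =>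
    intro l acc h
    match l with
    | [] => rw [PySem.Chars.replace.go] <;> simp [rep]
    | c :: cs =>
      rw [PySem.Chars.replace.go]
      have hp1 : 1 ≤ p.length := by match p, hp with | q :: qs, _ => simp
      by_cases hpre : p.isPrefixOf (c :: cs)
      · have hlen : (List.drop p.length (c :: cs)).length ≤ f := by
          simp only [List.length_drop, List.length_cons]
          simp only [List.length_cons] at h; omega
        simp only [hpre, if_true]
        rw [ih _ _ hlen, rep]
        simp only [hpre, if_true, List.reverse_append, List.reverse_reverse, List.append_assoc]
        congr 2
        match p, hp with
        | q :: qs, _ => simp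
      · have hlen : cs.length ≤ f := by simp only [List.length_cons] at h; omega
        simp only [hpre, if_false]
        rw [ih _ _ hlen, rep]
        simp [hpre]

lemma replace_eq_rep (s p t : List Char) (hp : p ≠ []) : PySem.Chars.replace s p t = rep p t s := by
  rw [PySem.Chars.replace]
  have h0 : p.isEmpty = false := by simp [hp]
  simp [h0, go_eq p t hp s.length s [] le_rfl]

-- A's six passes, composed in A's dict order
def chain (l : List Char) : List Char :=
  rep ['U','x'] ['U','X'] (rep ['U','i'] ['U','I'] (rep ['B','2','c'] ['B','2','C']
    (rep ['B','2','b'] ['B','2','B'] (rep ['A','p','i'] ['A','P','I'] (rep ['A','i'] ['A','I'] l)))))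

-- no suffix of l begins with the pattern "B2b2c" (the only place where A's passes cascade)
def NoPat (l : List Char) : Prop := ∀ t, t <:+ l → ¬ (['B','2','b','2','c'] <+: t)

lemma noPat_suffix {l s : List Char} (h : NoPat l) (hs : s <:+ l) : NoPat s :=
  fun t ht hp => h t (ht.trans hs) hp

-- rep keeps a head char that neither the source consumes nor the target produces
lemma rep_head_ne (p t : List Char) (ht : t ≠ []) (e : Char) (hte : t.head? ≠ some e)
    (l : List Char) (h : l.head? ≠ some e) : (rep p t l).head? ≠ some e := by
  match l with
  | [] => simp [rep]
  | c :: cs =>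
    rw [rep]
    by_cases hpre : p.isPrefixOf (c :: cs)
    · simp only [hpre, if_true]
      match t, ht with
      | d :: ds, _ => simpa using hte
    · simpa [hpre] using h

-- rep preserves "does not start with the two chars [d, e]" when the target is ≥ 2 chars,
-- does not start with [d, e], and does not start with e
lemma rep_pre2 (p t : List Char) (ht2 : 2 ≤ t.length) (d e : Char)
    (h1 : ¬ [d, e] <+: t) (hte : t.head? ≠ some e)
    (l : List Char) (h : ¬ [d, e] <+: l) : ¬ [d, e] <+: rep p t l := by
  match l with
  | [] => simp [rep]
  | c :: cs =>
    rw [rep]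
    by_cases hpre : p.isPrefixOf (c :: cs)
    · simp only [hpre, if_true]
      intro hcon
      apply h1
      have htake := hcon.take 2
      rw [List.take_append_of_le_length ht2] at htake
      simpa using htake.trans (List.take_prefix 2 t)
    · simp only [hpre, if_false]
      intro hcon
      obtain ⟨u, hu⟩ := hcon
      simp only [List.cons_append, List.nil_append] at hu
      injection hu with hcd htl
      have tne : t ≠ [] := by intro h0; subst h0; simp at ht2
      have hhead : (rep p t cs).head? = some e := by rw [← htl]; rfl
      have hcs : cs.head? ≠ some e := by
        intro hh
        apply h
        match cs, hh with
        | _ :: cs2, hh =>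
          simp only [List.head?_cons, Option.some.injEq] at hh
          subst hh; subst hcd
          exact ⟨cs2, rfl⟩
      exact rep_head_ne p t tne e hte cs hcs hhead

-- [e] <+: M ↔ M starts with e
lemma pre1_iff (e : Char) (M : List Char) : [e] <+: M ↔ M.head? = some e := by
  constructor
  · rintro ⟨u, rfl⟩; rfl
  · intro h
    match M, h with
    | _ :: M2, h =>
      simp only [List.head?_cons, Option.some.injEq] at h
      subst h; exact ⟨M2, rfl⟩

lemma rep_cons_neg (p t : List Char) (c : Char) (cs : List Char) (h : ¬ p <+: c :: cs) :
    rep p t (c :: cs) = c :: rep p t cs := by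
  rw [rep, if_neg]
  exact fun hh => h (List.isPrefixOf_iff_prefix.mp hh)

lemma no2c_chain3 (R : List Char) (h : ¬ ['2','c'] <+: R) :
    ¬ ['2','c'] <+: rep ['B','2','b'] ['B','2','B'] (rep ['A','p','i'] ['A','P','I'] (rep ['A','i'] ['A','I'] R)) := by
  apply rep_pre2 _ _ (by simp) _ _ (by decide) (by decide)
  apply rep_pre2 _ _ (by simp) _ _ (by decide) (by decide)
  exact rep_pre2 _ _ (by simp) _ _ (by decide) (by decide) _ h

-- under NoPat, the six sequential passes of A equal B's single scan
lemma chain_eq (l : List Char) (hnp : NoPat l) : chain l = pySubst l := by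
  revert hnp
  induction l using pySubst.induct with
  | case1 => intro _; simp [chain, rep, pySubst]
  | case2 c cs h1 ih =>
    intro hnp
    obtain ⟨R, hR⟩ := (PySem.Chars.startswith_iff _ _).mp h1
    simp only [List.cons_append, List.nil_append, List.cons.injEq] at hR
    obtain ⟨hc, hcs⟩ := hR
    subst hc; subst hcs
    simp only [List.drop_succ_cons, List.drop_zero] at ih
    rw [show pySubst ('A'::'i'::R) = ['A','I'] ++ pySubst R from by
      rw [pySubst]; simp [PySem.Chars.startswith, List.isPrefixOf]]
    rw [← ih (noPat_suffix hnp ⟨['A','i'], rfl⟩)]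
    simp [chain, rep, List.isPrefixOf]
  | case3 c cs h1 h2 ih =>
    intro hnp
    obtain ⟨R, hR⟩ := (PySem.Chars.startswith_iff _ _).mp h2
    simp only [List.cons_append, List.nil_append, List.cons.injEq] at hR
    obtain ⟨hc, hcs⟩ := hR
    subst hc; subst hcs
    simp only [List.drop_succ_cons, List.drop_zero] at ih
    rw [show pySubst ('A'::'p'::'i'::R) = ['A','P','I'] ++ pySubst R from by
      rw [pySubst]; simp [PySem.Chars.startswith, List.isPrefixOf]]
    rw [← ih (noPat_suffix hnp ⟨['A','p','i'], rfl⟩)]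
    simp [chain, rep, List.isPrefixOf]
  | case4 c cs h1 h2 h3 ih =>
    intro hnp
    obtain ⟨R, hR⟩ := (PySem.Chars.startswith_iff _ _).mp h3
    simp only [List.cons_append, List.nil_append, List.cons.injEq] at hR
    obtain ⟨hc, hcs⟩ := hR
    subst hc; subst hcs
    simp only [List.drop_succ_cons, List.drop_zero] at ih
    -- the B2b branch: the pass replacing "B2c" must walk past the freshly written "B2B",
    -- which cannot be followed by "2c" since no suffix of l begins with "B2b2c"
    have hnot2c : ¬ ['2','c'] <+: R := by
      rintro ⟨u, hu⟩
      subst hu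
      exact hnp _ (List.suffix_refl _) ⟨u, rfl⟩
    have hM := no2c_chain3 R hnot2c
    have hstep : rep ['B','2','c'] ['B','2','C']
        ('B' :: rep ['B','2','b'] ['B','2','B'] (rep ['A','p','i'] ['A','P','I'] (rep ['A','i'] ['A','I'] R)))
        = 'B' :: rep ['B','2','c'] ['B','2','C']
            (rep ['B','2','b'] ['B','2','B'] (rep ['A','p','i'] ['A','P','I'] (rep ['A','i'] ['A','I'] R))) := by
      apply rep_cons_neg
      intro hpre
      obtain ⟨u, hu⟩ := hpre
      simp only [List.cons_append, List.nil_append, List.cons.injEq] at hu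
      exact hM ⟨u, hu.2.symm ▸ rfl⟩
    rw [show pySubst ('B'::'2'::'b'::R) = ['B','2','B'] ++ pySubst R from by
      rw [pySubst]; simp [PySem.Chars.startswith, List.isPrefixOf]]
    rw [← ih (noPat_suffix hnp ⟨['B','2','b'], rfl⟩)]
    simp only [chain]
    simp only [rep, List.isPrefixOf, List.cons_prefix_cons]
    simp [rep, List.isPrefixOf, hstep]
  | case5 c cs h1 h2 h3 h4 ih =>
    intro hnp
    obtain ⟨R, hR⟩ := (PySem.Chars.startswith_iff _ _).mp h4
    simp only [List.cons_append, List.nil_append, List.cons.injEq] at hR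
    obtain ⟨hc, hcs⟩ := hR
    subst hc; subst hcs
    simp only [List.drop_succ_cons, List.drop_zero] at ih
    rw [show pySubst ('B'::'2'::'c'::R) = ['B','2','C'] ++ pySubst R from by
      rw [pySubst]; simp [PySem.Chars.startswith, List.isPrefixOf]]
    rw [← ih (noPat_suffix hnp ⟨['B','2','c'], rfl⟩)]
    simp [chain, rep, List.isPrefixOf]
  | case6 c cs h1 h2 h3 h4 h5 ih =>
    intro hnp
    obtain ⟨R, hR⟩ := (PySem.Chars.startswith_iff _ _).mp h5
    simp only [List.cons_append, List.nil_append, List.cons.injEq] at hR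
    obtain ⟨hc, hcs⟩ := hR
    subst hc; subst hcs
    simp only [List.drop_succ_cons, List.drop_zero] at ih
    rw [show pySubst ('U'::'i'::R) = ['U','I'] ++ pySubst R from by
      rw [pySubst]; simp [PySem.Chars.startswith, List.isPrefixOf]]
    rw [← ih (noPat_suffix hnp ⟨['U','i'], rfl⟩)]
    simp [chain, rep, List.isPrefixOf]
  | case7 c cs h1 h2 h3 h4 h5 h6 ih =>
    intro hnp
    obtain ⟨R, hR⟩ := (PySem.Chars.startswith_iff _ _).mp h6
    simp only [List.cons_append, List.nil_append, List.cons.injEq] at hR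
    obtain ⟨hc, hcs⟩ := hR
    subst hc; subst hcs
    simp only [List.drop_succ_cons, List.drop_zero] at ih
    rw [show pySubst ('U'::'x'::R) = ['U','X'] ++ pySubst R from by
      rw [pySubst]; simp [PySem.Chars.startswith, List.isPrefixOf]]
    rw [← ih (noPat_suffix hnp ⟨['U','x'], rfl⟩)]
    simp [chain, rep, List.isPrefixOf]
  | case8 c cs h1 h2 h3 h4 h5 h6 ih =>
    intro hnp
    -- no table entry matches at this position: every pass copies the head char
    have np : ∀ p, PySem.Chars.startswith (c :: cs) p = false → ¬ p <+: (c :: cs) := by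
      intro p hp hpre
      rw [(PySem.Chars.startswith_iff _ _).mpr hpre] at hp
      cases hp
    have nAi : ¬ ['A','i'] <+: (c :: cs) := np _ (by simpa using h1)
    have nApi : ¬ ['A','p','i'] <+: (c :: cs) := np _ (by simpa using h2)
    have nB2b : ¬ ['B','2','b'] <+: (c :: cs) := np _ (by simpa using h3)
    have nB2c : ¬ ['B','2','c'] <+: (c :: cs) := np _ (by simpa using h4)
    have nUi : ¬ ['U','i'] <+: (c :: cs) := np _ (by simpa using h5)
    have nUx : ¬ ['U','x'] <+: (c :: cs) := np _ (by simpa using h6)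
    have s1 := rep_cons_neg ['A','i'] ['A','I'] c cs nAi
    have s2 : rep ['A','p','i'] ['A','P','I'] (c :: rep ['A','i'] ['A','I'] cs)
        = c :: rep ['A','p','i'] ['A','P','I'] (rep ['A','i'] ['A','I'] cs) := by
      apply rep_cons_neg
      rw [List.cons_prefix_cons]
      rintro ⟨rfl, hpi⟩
      have : ¬ ['p','i'] <+: cs := by
        intro hh; apply nApi; rw [List.cons_prefix_cons]; exact ⟨rfl, hh⟩
      exact rep_pre2 _ _ (by simp) _ _ (by decide) (by decide) _ this hpi
    have s3 : rep ['B','2','b'] ['B','2','B']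
        (c :: rep ['A','p','i'] ['A','P','I'] (rep ['A','i'] ['A','I'] cs))
        = c :: rep ['B','2','b'] ['B','2','B'] (rep ['A','p','i'] ['A','P','I'] (rep ['A','i'] ['A','I'] cs)) := by
      apply rep_cons_neg
      rw [List.cons_prefix_cons]
      rintro ⟨rfl, h2b⟩
      have h0 : ¬ ['2','b'] <+: cs := by
        intro hh; apply nB2b; rw [List.cons_prefix_cons]; exact ⟨rfl, hh⟩
      have h0' := rep_pre2 ['A','i'] ['A','I'] (by simp) '2' 'b' (by decide) (by decide) _ h0
      exact rep_pre2 _ _ (by simp) _ _ (by decide) (by decide) _ h0' h2b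
    have s4 : rep ['B','2','c'] ['B','2','C']
        (c :: rep ['B','2','b'] ['B','2','B'] (rep ['A','p','i'] ['A','P','I'] (rep ['A','i'] ['A','I'] cs)))
        = c :: rep ['B','2','c'] ['B','2','C']
            (rep ['B','2','b'] ['B','2','B'] (rep ['A','p','i'] ['A','P','I'] (rep ['A','i'] ['A','I'] cs))) := by
      apply rep_cons_neg
      rw [List.cons_prefix_cons]
      rintro ⟨rfl, h2c⟩
      have h0 : ¬ ['2','c'] <+: cs := by
        intro hh; apply nB2c; rw [List.cons_prefix_cons]; exact ⟨rfl, hh⟩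
      exact no2c_chain3 cs h0 h2c
    have s5 : rep ['U','i'] ['U','I']
        (c :: rep ['B','2','c'] ['B','2','C'] (rep ['B','2','b'] ['B','2','B']
          (rep ['A','p','i'] ['A','P','I'] (rep ['A','i'] ['A','I'] cs))))
        = c :: rep ['U','i'] ['U','I'] (rep ['B','2','c'] ['B','2','C'] (rep ['B','2','b'] ['B','2','B']
          (rep ['A','p','i'] ['A','P','I'] (rep ['A','i'] ['A','I'] cs)))) := by
      apply rep_cons_neg
      rw [List.cons_prefix_cons]
      rintro ⟨rfl, hi⟩
      rw [pre1_iff] at hi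
      have h0 : cs.head? ≠ some 'i' := by
        intro hh; apply nUi; rw [List.cons_prefix_cons, pre1_iff]; exact ⟨rfl, hh⟩
      have k1 := rep_head_ne ['A','i'] ['A','I'] (by simp) 'i' (by decide) cs h0
      have k2 := rep_head_ne ['A','p','i'] ['A','P','I'] (by simp) 'i' (by decide) _ k1
      have k3 := rep_head_ne ['B','2','b'] ['B','2','B'] (by simp) 'i' (by decide) _ k2
      have k4 := rep_head_ne ['B','2','c'] ['B','2','C'] (by simp) 'i' (by decide) _ k3
      exact k4 hi
    have s6 : rep ['U','x'] ['U','X']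
        (c :: rep ['U','i'] ['U','I'] (rep ['B','2','c'] ['B','2','C'] (rep ['B','2','b'] ['B','2','B']
          (rep ['A','p','i'] ['A','P','I'] (rep ['A','i'] ['A','I'] cs)))))
        = c :: rep ['U','x'] ['U','X'] (rep ['U','i'] ['U','I'] (rep ['B','2','c'] ['B','2','C']
          (rep ['B','2','b'] ['B','2','B'] (rep ['A','p','i'] ['A','P','I'] (rep ['A','i'] ['A','I'] cs))))) := by
      apply rep_cons_neg
      rw [List.cons_prefix_cons]
      rintro ⟨rfl, hx⟩
      rw [pre1_iff] at hx
      have h0 : cs.head? ≠ some 'x' := by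
        intro hh; apply nUx; rw [List.cons_prefix_cons, pre1_iff]; exact ⟨rfl, hh⟩
      have k1 := rep_head_ne ['A','i'] ['A','I'] (by simp) 'x' (by decide) cs h0
      have k2 := rep_head_ne ['A','p','i'] ['A','P','I'] (by simp) 'x' (by decide) _ k1
      have k3 := rep_head_ne ['B','2','b'] ['B','2','B'] (by simp) 'x' (by decide) _ k2
      have k4 := rep_head_ne ['B','2','c'] ['B','2','C'] (by simp) 'x' (by decide) _ k3
      have k5 := rep_head_ne ['U','i'] ['U','I'] (by simp) 'x' (by decide) _ k4
      exact k5 hx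
    have hps : pySubst (c :: cs) = c :: pySubst cs := by
      rw [pySubst]
      simp only [eq_false h1, eq_false h2, eq_false h3, eq_false h4, eq_false h5,
        eq_false h6, if_false]
    rw [hps, ← ih (noPat_suffix hnp (List.suffix_cons c cs))]
    simp only [chain, s1, s2, s3, s4, s5, s6]

-- ---- Pre_ implies NoPat of the capitalized-and-joined title ----

lemma charOfNat_toNat (n : Nat) (h : n < 55296) : (Char.ofNat n).toNat = n := by
  rw [Char.toNat_ofNat, if_pos (Or.inl h)]

lemma lowerChar_ne_B (c : Char) : PySem.Chars.lowerChar c ≠ 'B' := by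
  unfold PySem.Chars.lowerChar PySem.Chars.isupper
  split_ifs with h
  · simp only [decide_eq_true_eq, Bool.and_eq_true] at h
    intro heq
    have hA : (65:Nat) ≤ c.toNat := h.1
    have hZ : c.toNat ≤ (90:Nat) := h.2
    have h2 : (Char.ofNat (c.toNat + 32)).toNat = c.toNat + 32 := charOfNat_toNat _ (by omega)
    rw [heq] at h2
    change (66:Nat) = _ at h2
    omega
  · intro heq; subst heq; simp at h

lemma upperChar_B (c : Char) (h : PySem.Chars.upperChar c = 'B') : PySem.Chars.lowerChar c = 'b' := by
  unfold PySem.Chars.upperChar PySem.Chars.islower at h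
  split_ifs at h with hl
  · simp only [decide_eq_true_eq, Bool.and_eq_true] at hl
    have ha : (97:Nat) ≤ c.toNat := hl.1
    have hz : c.toNat ≤ (122:Nat) := hl.2
    have h2 : (Char.ofNat (c.toNat - 32)).toNat = c.toNat - 32 := charOfNat_toNat _ (by omega)
    rw [h] at h2
    change (66:Nat) = _ at h2
    have hc : c = 'b' := Char.ext (UInt32.toNat_inj.mp (by change c.toNat = 98; omega))
    subst hc; decide
  · subst h; decide

lemma suffix_append_cases (t a b : List Char) (h : t <:+ a ++ b) :
    t <:+ b ∨ ∃ a', a' <:+ a ∧ t = a' ++ b := by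
  obtain ⟨u, hu⟩ := h
  rcases List.append_eq_append_iff.mp hu with ⟨a', h1, h2⟩ | ⟨c', h1, h2⟩
  · exact Or.inr ⟨a', ⟨u, h1.symm⟩, h2⟩
  · exact Or.inl ⟨c', h2.symm⟩

lemma cap_ok (w : List Char) (hw : ¬ (['b','2','b','2','c'] <+: PySem.Chars.lower w)) :
    ¬ (['B','2','b','2','c'] <+: pyCapitalize w) := by
  match w with
  | [] => simp [pyCapitalize]
  | h :: t =>
    rintro ⟨u, hu⟩
    simp only [pyCapitalize, List.cons_append, List.nil_append, List.cons.injEq] at hu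
    obtain ⟨hB, htl⟩ := hu
    apply hw
    rw [show PySem.Chars.lower (h :: t) = PySem.Chars.lowerChar h :: PySem.Chars.lower t from rfl,
        upperChar_B h hB.symm]
    exact ⟨u, by rw [← htl]; simp⟩

-- a word whose lowercase form does not begin with "b2b2c" cannot carry the pattern at its
-- start, even continuing into the space that follows it in the title
lemma word_ok (w x : List Char) (hw : ¬ (['b','2','b','2','c'] <+: PySem.Chars.lower w))
    (hx : x = [] ∨ x.head? = some ' ') :
    ¬ (['B','2','b','2','c'] <+: pyCapitalize w ++ x) := by
  intro hpre
  by_cases hlen : (5:Nat) ≤ (pyCapitalize w).length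
  · exact cap_ok w hw (List.prefix_of_prefix_length_le hpre (List.prefix_append _ _) hlen)
  · have hcw : pyCapitalize w <+: (['B','2','b','2','c'] : List Char) :=
      List.prefix_of_prefix_length_le (List.prefix_append _ _) hpre (by simp only [List.length_cons, List.length_nil]; omega)
    obtain ⟨q, hq⟩ := hcw
    obtain ⟨u, hu⟩ := hpre
    rw [← hq, List.append_assoc] at hu
    have hqu : q ++ u = x := List.append_cancel_left hu
    have hqne : q ≠ [] := by
      intro h0
      rw [h0, List.append_nil] at hq
      have hlq := congrArg List.length hq
      simp at hlq
      omega
    match q, hqne with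
    | d :: ds, _ =>
      have hd : d ∈ (['B','2','b','2','c'] : List Char) := by
        rw [← hq]; exact List.mem_append_right _ (List.mem_cons_self ..)
      rcases hx with rfl | hx
      · cases hqu
      · match x, hx with
        | e :: _, hx =>
          simp only [List.head?_cons, Option.some.injEq] at hx
          subst hx
          simp only [List.cons_append, List.cons.injEq] at hqu
          rw [hqu.1] at hd
          simp at hd

lemma noB_block (a x : List Char) (ha : 'B' ∉ a) (hx : x.head? ≠ some 'B') :
    ¬ (['B','2','b','2','c'] <+: a ++ x) := by
  match a with
  | [] =>
    rintro ⟨u, hu⟩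
    apply hx
    rw [List.nil_append] at hu
    rw [← hu]; rfl
  | c :: a' =>
    rintro ⟨u, hu⟩
    simp only [List.cons_append, List.nil_append, List.cons.injEq] at hu
    exact ha (hu.1 ▸ List.mem_cons_self ..)

lemma lower_no_B (t : List Char) : 'B' ∉ PySem.Chars.lower t := by
  intro hmem
  obtain ⟨c, _, hc⟩ := List.mem_map.mp hmem
  exact lowerChar_ne_B c hc

-- any occurrence of the pattern in one capitalized word followed by x lies strictly inside x
lemma block_noPat (w x rest : List Char) (hw : ¬ (['b','2','b','2','c'] <+: PySem.Chars.lower w))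
    (hx : x = [] ∨ x = ' ' :: rest) (t : List Char) (ht : t <:+ pyCapitalize w ++ x)
    (hp : ['B','2','b','2','c'] <+: t) : t <:+ x ∧ t ≠ x := by
  rcases suffix_append_cases t _ _ ht with hsx | ⟨a', ha', rfl⟩
  · refine ⟨hsx, ?_⟩
    rintro rfl
    rcases hx with rfl | rfl
    · obtain ⟨u, hu⟩ := hp; cases hu
    · obtain ⟨u, hu⟩ := hp; cases hu
  · exfalso
    match w with
    | [] =>
      have ha0 : a' = [] := by
        have := ha'.sublist.length_le
        simp only [pyCapitalize, List.length_nil] at this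
        exact List.eq_nil_of_length_eq_zero (by omega)
      subst ha0
      rw [List.nil_append] at hp
      rcases hx with rfl | rfl
      · obtain ⟨u, hu⟩ := hp; cases hu
      · obtain ⟨u, hu⟩ := hp; cases hu
    | h :: tl =>
      have hcap : pyCapitalize (h :: tl) = PySem.Chars.upperChar h :: PySem.Chars.lower tl := rfl
      rw [hcap] at ha'
      rcases List.suffix_cons_iff.mp ha' with rfl | hlow
      · exact word_ok (h :: tl) x hw (by
          rcases hx with rfl | rfl
          · exact Or.inl rfl
          · exact Or.inr rfl) (by rw [hcap]; exact hp)
      · refine noB_block a' x (fun hm => lower_no_B tl (hlow.subset hm)) ?_ hp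
        rcases hx with rfl | rfl
        · simp
        · simp

lemma key (ws : List (List Char))
    (hall : ∀ w ∈ ws, ¬ (['b','2','b','2','c'] <+: PySem.Chars.lower w)) :
    NoPat (PySem.Chars.join [' '] (ws.map pyCapitalize)) := by
  induction ws with
  | nil =>
    intro t ht hp
    have ht0 : t = [] := by
      simpa [PySem.Chars.join, List.intercalate] using ht
    subst ht0
    obtain ⟨u, hu⟩ := hp; cases hu
  | cons w ws ih =>
    match ws with
    | [] =>
      have hj : PySem.Chars.join [' '] ([w].map pyCapitalize) = pyCapitalize w := by
        simp [PySem.Chars.join, List.intercalate]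
      rw [hj]
      intro t ht hp
      have hb := block_noPat w [] [] (hall w (by simp)) (Or.inl rfl) t
        (by rw [List.append_nil]; exact ht) hp
      exact hb.2 (List.suffix_nil.mp hb.1)
    | w2 :: ws2 =>
      have hj : PySem.Chars.join [' '] ((w :: w2 :: ws2).map pyCapitalize)
          = pyCapitalize w ++ (' ' :: PySem.Chars.join [' '] ((w2 :: ws2).map pyCapitalize)) := by
        simp [PySem.Chars.join, List.intercalate, List.intersperse]
      rw [hj]
      intro t ht hp
      have hb := block_noPat w (' ' :: PySem.Chars.join [' '] ((w2 :: ws2).map pyCapitalize))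
        (PySem.Chars.join [' '] ((w2 :: ws2).map pyCapitalize))
        (hall w (by simp)) (Or.inr rfl) t ht hp
      rcases List.suffix_cons_iff.mp hb.1 with heq | hj2
      · exact hb.2 heq
      · exact ih (fun w' hw' => hall w' (List.mem_cons_of_mem _ hw')) t hj2 hp

theorem humanize_spec_aux (phrase : String)
    (hpre : Pre_humanize_dynamic_topic_name_py phrase) :
    humanize_dynamic_topic_name_py phrase = humanize_dynamic_topic_name_py_alt phrase := by
  unfold humanize_dynamic_topic_name_py humanize_dynamic_topic_name_py_alt
  simp only [List.foldl]
  rw [replace_eq_rep _ ['A','i'] ['A','I'] (by simp),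
      replace_eq_rep _ ['A','p','i'] ['A','P','I'] (by simp),
      replace_eq_rep _ ['B','2','b'] ['B','2','B'] (by simp),
      replace_eq_rep _ ['B','2','c'] ['B','2','C'] (by simp),
      replace_eq_rep _ ['U','i'] ['U','I'] (by simp),
      replace_eq_rep _ ['U','x'] ['U','X'] (by simp)]
  rw [show (rep ['U','x'] ['U','X'] (rep ['U','i'] ['U','I'] (rep ['B','2','c'] ['B','2','C']
      (rep ['B','2','b'] ['B','2','B'] (rep ['A','p','i'] ['A','P','I'] (rep ['A','i'] ['A','I']
        (PySem.Chars.join [' '] ((PySem.Chars.split₀ phrase.toList).map pyCapitalize))))))))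
      = chain (PySem.Chars.join [' '] ((PySem.Chars.split₀ phrase.toList).map pyCapitalize)) from rfl]
  exact congrArg String.mk (chain_eq _ (key _ hpre))

-- ===== VERDICT (by name: the statement is the Claim_ definition above) =====
theorem humanize_dynamic_topic_name_py_spec : Claim_equal_humanize_dynamic_topic_name_py := by
  intro phrase _ hpre
  unfold Spec_humanize_dynamic_topic_name_py
  exact humanize_spec_aux phrase hpre
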